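-- pv_equiv track=rewrite | github.com/biostat821-2023/Final__project | src/analysis.py | find_samples_in_cancertype_patient
-- ===== SOURCE A (Python) =====
-- from typing import List, Tuple, Dict, Any
--
-- def find_samples_in_cancertype_patient(samples: List[Tuple]) -> Dict[str, int]:
--     """Find the number of samples in each cancer type of each patient."""
--     patient_cancer_type_dict = {}  # type: ignore
--     for sample in samples:
--         if sample[1] not in patient_cancer_type_dict:
--             patient_cancer_type_dict[sample[1]] = {}  # type: ignore
--         if sample[3] not in patient_cancer_type_dict[sample[1]]:
--             patient_cancer_type_dict[sample[1]][sample[3]] = 1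
--         else:
--             patient_cancer_type_dict[sample[1]][sample[3]] += 1
--     return patient_cancer_type_dict
-- ===== SOURCE B (Python) =====
-- def find_samples_in_cancertype_patient(samples):
--     """Find the number of samples in each cancer type of each patient."""
--     patients = list(dict.fromkeys(s[1] for s in samples))
--     return {
--         p: {c: sum(1 for s in samples if s[1] == p and s[3] == c)
--             for c in dict.fromkeys(s[3] for s in samples if s[1] == p)}
--         for p in patients
--     }
-- ===== Notes on version B (the rewrite author's own statement) =====
-- stated objective: alternative
-- what changed: Replaced the incremental nested-dict mutation loop by a closed-form nested comprehension: dedup the patients in first-appearance order, then for each patient dedup their cancer types and count matching samples with a scan.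
import Mathlib
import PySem

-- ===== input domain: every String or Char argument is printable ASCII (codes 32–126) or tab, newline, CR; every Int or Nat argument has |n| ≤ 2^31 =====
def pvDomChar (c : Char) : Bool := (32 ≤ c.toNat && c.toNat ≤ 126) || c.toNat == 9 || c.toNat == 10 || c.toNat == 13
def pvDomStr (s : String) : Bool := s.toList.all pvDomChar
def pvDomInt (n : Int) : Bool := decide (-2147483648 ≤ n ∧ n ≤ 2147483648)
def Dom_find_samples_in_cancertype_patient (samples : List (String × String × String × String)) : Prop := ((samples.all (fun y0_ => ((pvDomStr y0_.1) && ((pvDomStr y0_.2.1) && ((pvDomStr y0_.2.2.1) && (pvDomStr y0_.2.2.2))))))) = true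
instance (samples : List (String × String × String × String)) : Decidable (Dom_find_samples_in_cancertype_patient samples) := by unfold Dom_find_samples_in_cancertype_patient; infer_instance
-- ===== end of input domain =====

-- B replaces A's incremental nested-dict mutation loop by a closed form: dedup the
-- patients in first-appearance order, then per patient dedup the cancer types and count
-- matching samples by a scan (objective: alternative decomposition, not faster).

-- ===== PORT A =====
-- literal transliteration of A's loop: dict of dicts built incrementally, returned as
-- insertion-ordered association lists (Dict.items)
def find_samples_in_cancertype_patient (samples : List (String × String × String × String)) : List (String × List (String × Int)) :=
  let d := samples.foldl (fun d sample =>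
    let d := if !(d.contains sample.2.1) then d.insert sample.2.1 PySem.Dict.empty else d
    let inner := d.getD sample.2.1 PySem.Dict.empty
    let inner' := if !(inner.contains sample.2.2.2) then
        inner.insert sample.2.2.2 (1 : Int)
      else
        inner.insert sample.2.2.2 (inner.getD sample.2.2.2 0 + 1)
    d.insert sample.2.1 inner')
    (PySem.Dict.empty : PySem.Dict String (PySem.Dict String Int))
  d.items.map (fun e => (e.1, e.2.items))

-- ===== PORT B =====
-- literal transliteration of Source B: dict.fromkeys dedup (= PySem.List.dedup), nested
-- comprehension with a counting scan (sum of 1's = filter length)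
def find_samples_in_cancertype_patient_alt (samples : List (String × String × String × String)) : List (String × List (String × Int)) :=
  let patients := PySem.List.dedup (samples.map (fun s => s.2.1))
  patients.map (fun p =>
    (p, (PySem.List.dedup ((samples.filter (fun s => s.2.1 == p)).map (fun s => s.2.2.2))).map
          (fun c => (c, ((samples.filter (fun s => s.2.1 == p && s.2.2.2 == c)).length : Int)))))

-- ===== PRECONDITION & SPEC =====
def Spec_find_samples_in_cancertype_patient (samples : List (String × String × String × String)) (out : List (String × List (String × Int))) : Prop := out = find_samples_in_cancertype_patient_alt samples
instance (samples : List (String × String × String × String)) (out : List (String × List (String × Int))) : Decidable (Spec_find_samples_in_cancertype_patient samples out) := by unfold Spec_find_samples_in_cancertype_patient; infer_instance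

-- ===== CLAIM (what is proved, stated in full; the proofs are below) =====
def Claim_equal_find_samples_in_cancertype_patient : Prop := ∀ (samples : List (String × String × String × String)), Dom_find_samples_in_cancertype_patient samples → Spec_find_samples_in_cancertype_patient samples (find_samples_in_cancertype_patient samples)

-- ===== LEMMAS AND PROOFS =====

-- a dict whose items are a map over a list of distinct keys
def pvMk {ν : Type} (l : List String) (f : String → ν) : PySem.Dict String ν :=
  PySem.Dict.mk (l.map (fun k => (k, f k)))

lemma pvMk_keys {ν : Type} (l : List String) (f : String → ν) : (pvMk l f).keys = l := by
  simp [pvMk, PySem.Dict.keys, List.map_map, Function.comp_def]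

lemma pvMk_contains {ν : Type} (l : List String) (f : String → ν) (k : String) :
    (pvMk l f).contains k = decide (k ∈ l) := by
  rw [PySem.Dict.contains_eq_decide_mem_keys, pvMk_keys]

lemma pvMk_getD {ν : Type} {l : List String} (f : String → ν) {k : String}
    (hl : l.Nodup) (hk : k ∈ l) (d0 : ν) : (pvMk l f).getD k d0 = f k := by
  refine PySem.Dict.getD_of_mem_items _ ?_ ?_ d0
  · exact List.mem_map_of_mem hk
  · rw [pvMk_keys]; exact hl

lemma pvMk_congr {ν : Type} {l : List String} {f g : String → ν}
    (h : ∀ q ∈ l, f q = g q) : pvMk l f = pvMk l g := by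
  apply PySem.Dict.ext
  exact List.map_congr_left (fun q hq => by rw [h q hq])

lemma pvMk_insert_mem {ν : Type} {l : List String} (f : String → ν) {k : String}
    (hk : k ∈ l) (v : ν) :
    (pvMk l f).insert k v = pvMk l (fun q => if q = k then v else f q) := by
  apply PySem.Dict.ext
  rw [PySem.Dict.items_insert_of_contains _ v (by simp [pvMk_contains, hk])]
  show (List.map _ l).map _ = _
  rw [List.map_map]
  refine List.map_congr_left (fun q _ => ?_)
  by_cases h : q = k <;> simp [h]

lemma pvMk_insert_not_mem {ν : Type} {l : List String} (f : String → ν) {k : String}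
    (hk : k ∉ l) (v : ν) :
    (pvMk l f).insert k v = pvMk (l ++ [k]) (fun q => if q = k then v else f q) := by
  apply PySem.Dict.ext
  rw [PySem.Dict.items_insert_of_not_contains _ v (by simp [pvMk_contains, hk])]
  show List.map _ l ++ [(k, v)] = List.map _ (l ++ [k])
  rw [List.map_append]
  congr 1
  · refine List.map_congr_left (fun q hq => ?_)
    have : q ≠ k := fun h => hk (h ▸ hq)
    simp [this]
  · simp

-- projections and closed-form pieces
def pvPat (s : String × String × String × String) : String := s.2.1
def pvCt (s : String × String × String × String) : String := s.2.2.2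

def pvCts (xs : List (String × String × String × String)) (p : String) : List String :=
  (xs.filter (fun s => s.2.1 == p)).map (fun s => s.2.2.2)

def pvCnt (xs : List (String × String × String × String)) (p c : String) : Int :=
  ((xs.filter (fun s => s.2.1 == p && s.2.2.2 == c)).length : Int)

-- the closed form as a nested Dict
def pvAltD (xs : List (String × String × String × String)) : PySem.Dict String (PySem.Dict String Int) :=
  pvMk (PySem.List.dedup (xs.map (fun s => s.2.1)))
    (fun p => pvMk (PySem.List.dedup (pvCts xs p)) (fun c => pvCnt xs p c))

-- A's loop body, named for the proofs (definitionally the lambda in port A)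
def pvStepA (d : PySem.Dict String (PySem.Dict String Int))
    (sample : String × String × String × String) : PySem.Dict String (PySem.Dict String Int) :=
  let d := if !(d.contains sample.2.1) then d.insert sample.2.1 PySem.Dict.empty else d
  let inner := d.getD sample.2.1 PySem.Dict.empty
  let inner' := if !(inner.contains sample.2.2.2) then
      inner.insert sample.2.2.2 (1 : Int)
    else
      inner.insert sample.2.2.2 (inner.getD sample.2.2.2 0 + 1)
  d.insert sample.2.1 inner'

lemma pvA_eq_foldl (xs : List (String × String × String × String)) :
    find_samples_in_cancertype_patient xs
      = (xs.foldl pvStepA PySem.Dict.empty).items.map (fun e => (e.1, e.2.items)) := rfl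

lemma pvAlt_eq_altD (xs : List (String × String × String × String)) :
    find_samples_in_cancertype_patient_alt xs = (pvAltD xs).items.map (fun e => (e.1, e.2.items)) := by
  simp [find_samples_in_cancertype_patient_alt, pvAltD, pvMk, pvCts, pvCnt,
    List.map_map, Function.comp_def]

lemma pvCts_append (xs : List (String × String × String × String))
    (s : String × String × String × String) (q : String) :
    pvCts (xs ++ [s]) q = pvCts xs q ++ (if s.2.1 = q then [s.2.2.2] else []) := by
  by_cases h : s.2.1 = q <;> simp [pvCts, List.filter_append, h]

lemma pvCnt_append (xs : List (String × String × String × String))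
    (s : String × String × String × String) (q c : String) :
    pvCnt (xs ++ [s]) q c = pvCnt xs q c + (if s.2.1 = q ∧ s.2.2.2 = c then 1 else 0) := by
  by_cases h1 : s.2.1 = q <;> by_cases h2 : s.2.2.2 = c <;>
    simp [pvCnt, List.filter_append, h1, h2]

lemma pvCnt_eq_zero (xs : List (String × String × String × String)) {p c : String}
    (hc : c ∉ pvCts xs p) : pvCnt xs p c = 0 := by
  have : xs.filter (fun s => s.2.1 == p && s.2.2.2 == c) = [] := by
    rw [List.filter_eq_nil_iff]
    intro s hs hmem
    simp only [Bool.and_eq_true, beq_iff_eq] at hmem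
    exact hc (List.mem_map.2 ⟨s, List.mem_filter.2 ⟨hs, by simp [hmem.1]⟩, hmem.2⟩)
  simp [pvCnt, this]

lemma pvCts_empty_of_not_mem (xs : List (String × String × String × String)) {p : String}
    (hp : p ∉ xs.map (fun s => s.2.1)) : pvCts xs p = [] := by
  simp only [pvCts, List.map_eq_nil_iff, List.filter_eq_nil_iff]
  intro s hs hmem
  simp only [beq_iff_eq] at hmem
  exact hp (List.mem_map.2 ⟨s, hs, hmem⟩)

lemma pvStep_altD (xs : List (String × String × String × String))
    (s : String × String × String × String) :
    pvStepA (pvAltD xs) s = pvAltD (xs ++ [s]) := by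
  obtain ⟨a, p, b, c⟩ := s
  have hpats : (xs ++ [(a, p, b, c)]).map (fun t => t.2.1) = xs.map (fun t => t.2.1) ++ [p] := by
    simp
  have hnd : (PySem.List.dedup (xs.map (fun t => t.2.1))).Nodup := by
    simp only [PySem.List.dedup_eq_ofList]; exact PySem.Set.nodup_ofList _
  by_cases hp : p ∈ xs.map (fun t => t.2.1)
  · -- patient already present
    have hdedup : PySem.List.dedup ((xs ++ [(a, p, b, c)]).map (fun t => t.2.1))
        = PySem.List.dedup (xs.map (fun t => t.2.1)) := by
      rw [hpats]
      simp only [PySem.List.dedup_eq_ofList, PySem.Set.ofList_append_singleton]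
      exact PySem.Set.add_of_mem (by simpa [PySem.Set.mem_ofList] using hp)
    have hpmem : p ∈ PySem.List.dedup (xs.map (fun t => t.2.1)) := by
      simpa [PySem.List.dedup_eq_ofList, PySem.Set.mem_ofList] using hp
    have hcontains : (pvAltD xs).contains p = true := by
      unfold pvAltD; rw [pvMk_contains]; exact decide_eq_true hpmem
    have hndc : (PySem.List.dedup (pvCts xs p)).Nodup := by
      simp only [PySem.List.dedup_eq_ofList]; exact PySem.Set.nodup_ofList _
    have hinner : (pvAltD xs).getD p PySem.Dict.empty
        = pvMk (PySem.List.dedup (pvCts xs p)) (fun c' => pvCnt xs p c') :=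
      pvMk_getD _ hnd hpmem _
    have hctsapp : pvCts (xs ++ [(a, p, b, c)]) p = pvCts xs p ++ [c] := by
      rw [pvCts_append]; simp
    simp only [pvStepA]
    rw [hcontains]
    simp only [Bool.not_true, Bool.false_eq_true, if_false]
    rw [hinner, pvMk_contains]
    by_cases hc : c ∈ pvCts xs p
    · -- cancer type already present: increment
      have hcmem : c ∈ PySem.List.dedup (pvCts xs p) := by
        simpa [PySem.List.dedup_eq_ofList, PySem.Set.mem_ofList] using hc
      have hdedupc : PySem.List.dedup (pvCts (xs ++ [(a, p, b, c)]) p)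
          = PySem.List.dedup (pvCts xs p) := by
        rw [hctsapp]
        simp only [PySem.List.dedup_eq_ofList, PySem.Set.ofList_append_singleton]
        exact PySem.Set.add_of_mem (by simpa [PySem.Set.mem_ofList] using hc)
      rw [decide_eq_true hcmem]
      simp only [Bool.not_true, Bool.false_eq_true, if_false]
      rw [pvMk_getD _ hndc hcmem, pvMk_insert_mem _ hcmem,
        show pvAltD xs = pvMk (PySem.List.dedup (xs.map (fun t => t.2.1)))
          (fun q => pvMk (PySem.List.dedup (pvCts xs q)) (fun c' => pvCnt xs q c')) from rfl,
        pvMk_insert_mem _ hpmem]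
      unfold pvAltD
      rw [hdedup]
      refine pvMk_congr (fun q hq => ?_)
      by_cases hqp : q = p
      · subst hqp
        rw [if_pos rfl, hdedupc]
        refine pvMk_congr (fun c' hc' => ?_)
        by_cases hcc : c' = c
        · subst hcc
          rw [if_pos rfl, pvCnt_append, if_pos ⟨rfl, rfl⟩]
        · rw [if_neg hcc, pvCnt_append, if_neg (fun h => hcc h.2.symm), add_zero]
      · rw [if_neg hqp]
        have hcts : pvCts (xs ++ [(a, p, b, c)]) q = pvCts xs q := by
          rw [pvCts_append, if_neg (fun h => hqp h.symm), List.append_nil]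
        rw [hcts]
        refine pvMk_congr (fun c' _ => ?_)
        rw [pvCnt_append, if_neg (fun h => hqp h.1.symm), add_zero]
    · -- new cancer type for this patient
      have hcmem : c ∉ PySem.List.dedup (pvCts xs p) := by
        simpa [PySem.List.dedup_eq_ofList, PySem.Set.mem_ofList] using hc
      have hdedupc : PySem.List.dedup (pvCts (xs ++ [(a, p, b, c)]) p)
          = PySem.List.dedup (pvCts xs p) ++ [c] := by
        rw [hctsapp]
        simp only [PySem.List.dedup_eq_ofList, PySem.Set.ofList_append_singleton]
        exact PySem.Set.add_of_not_mem (by simpa [PySem.Set.mem_ofList] using hc)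
      rw [decide_eq_false hcmem]
      simp only [Bool.not_false, if_true]
      rw [pvMk_insert_not_mem _ hcmem,
        show pvAltD xs = pvMk (PySem.List.dedup (xs.map (fun t => t.2.1)))
          (fun q => pvMk (PySem.List.dedup (pvCts xs q)) (fun c' => pvCnt xs q c')) from rfl,
        pvMk_insert_mem _ hpmem]
      unfold pvAltD
      rw [hdedup]
      refine pvMk_congr (fun q hq => ?_)
      by_cases hqp : q = p
      · subst hqp
        rw [if_pos rfl, hdedupc]
        refine pvMk_congr (fun c' hc' => ?_)
        by_cases hcc : c' = c
        · subst hcc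
          rw [if_pos rfl, pvCnt_append, if_pos ⟨rfl, rfl⟩, pvCnt_eq_zero xs hc, zero_add]
        · rw [if_neg hcc, pvCnt_append, if_neg (fun h => hcc h.2.symm), add_zero]
      · rw [if_neg hqp]
        have hcts : pvCts (xs ++ [(a, p, b, c)]) q = pvCts xs q := by
          rw [pvCts_append, if_neg (fun h => hqp h.symm), List.append_nil]
        rw [hcts]
        refine pvMk_congr (fun c' _ => ?_)
        rw [pvCnt_append, if_neg (fun h => hqp h.1.symm), add_zero]
  · -- new patient
    have hpmem : p ∉ PySem.List.dedup (xs.map (fun t => t.2.1)) := by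
      simpa [PySem.List.dedup_eq_ofList, PySem.Set.mem_ofList] using hp
    have hdedup : PySem.List.dedup ((xs ++ [(a, p, b, c)]).map (fun t => t.2.1))
        = PySem.List.dedup (xs.map (fun t => t.2.1)) ++ [p] := by
      rw [hpats]
      simp only [PySem.List.dedup_eq_ofList, PySem.Set.ofList_append_singleton]
      exact PySem.Set.add_of_not_mem (by simpa [PySem.Set.mem_ofList] using hp)
    have hcontains : (pvAltD xs).contains p = false := by
      unfold pvAltD; rw [pvMk_contains]; exact decide_eq_false hpmem
    have hctsnil : pvCts xs p = [] := pvCts_empty_of_not_mem xs hp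
    have hnd' : (PySem.List.dedup (xs.map (fun t => t.2.1)) ++ [p]).Nodup :=
      hnd.append (List.nodup_singleton p)
        (fun x hx hx2 => hpmem ((List.mem_singleton.1 hx2) ▸ hx))
    have hpmem' : p ∈ PySem.List.dedup (xs.map (fun t => t.2.1)) ++ [p] := by simp
    simp only [pvStepA]
    rw [hcontains]
    simp only [Bool.not_false, if_true]
    rw [show pvAltD xs = pvMk (PySem.List.dedup (xs.map (fun t => t.2.1)))
        (fun q => pvMk (PySem.List.dedup (pvCts xs q)) (fun c' => pvCnt xs q c')) from rfl,
      pvMk_insert_not_mem _ hpmem,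
      pvMk_getD _ hnd' hpmem', if_pos rfl, PySem.Dict.contains_empty]
    simp only [Bool.not_false, if_true]
    rw [show (PySem.Dict.empty : PySem.Dict String Int) = pvMk [] (fun c' => pvCnt xs p c') from rfl,
      pvMk_insert_not_mem _ (by simp : c ∉ ([] : List String)),
      pvMk_insert_mem _ hpmem']
    unfold pvAltD
    rw [hdedup]
    refine pvMk_congr (fun q hq => ?_)
    by_cases hqp : q = p
    · subst hqp
      rw [if_pos rfl]
      have h1 : pvCts (xs ++ [(a, q, b, c)]) q = [c] := by
        rw [pvCts_append, hctsnil, if_pos rfl, List.nil_append]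
      rw [h1, show PySem.List.dedup ([c] : List String) = [c] from rfl]
      refine pvMk_congr (fun c' hc' => ?_)
      have hc'' : c' = c := by simpa using hc'
      subst hc''
      rw [if_pos rfl, pvCnt_append, if_pos ⟨rfl, rfl⟩,
        pvCnt_eq_zero xs (by rw [hctsnil]; simp), zero_add]
    · rw [if_neg hqp]
      have hcts : pvCts (xs ++ [(a, p, b, c)]) q = pvCts xs q := by
        rw [pvCts_append, if_neg (fun h => hqp h.symm), List.append_nil]
      rw [hcts, if_neg hqp]
      refine pvMk_congr (fun c' _ => ?_)
      rw [pvCnt_append, if_neg (fun h => hqp h.1.symm), add_zero]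

lemma pvLoop_eq (xs : List (String × String × String × String)) :
    xs.foldl pvStepA PySem.Dict.empty = pvAltD xs := by
  induction xs using List.reverseRecOn with
  | nil => rfl
  | append_singleton xs s ih =>
    rw [List.foldl_append, List.foldl_cons, List.foldl_nil, ih, pvStep_altD]

-- ===== VERDICT (by name: the statement is the Claim_ definition above) =====
theorem find_samples_in_cancertype_patient_spec : Claim_equal_find_samples_in_cancertype_patient := by
  intro samples _
  unfold Spec_find_samples_in_cancertype_patient
  rw [pvA_eq_foldl, pvAlt_eq_altD, pvLoop_eq]
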